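-- pv_equiv track=rewrite | github.com/CXJJYSH/My-Code | 算法/力扣/灵神/讲解/基础算法精讲/02 双指针/03 题单/01 单序列双指针/02 相向双指针/01 基础/13 1 LCP 28. 采购方案.py | purchasePlans
-- ===== SOURCE A (Python) =====
-- from typing import List
--
-- def purchasePlans(nums: List[int], target: int) -> int:
--     nums.sort()
--
--     ans = 0
--
--     left = 0
--     right = len(nums) - 1
--
--     while left < right:
--         if nums[left] + nums[right] <= target:
--             ans += right - left
--             left += 1
--         else:
--             right -= 1
--
--     return ans % 1000000007
-- ===== SOURCE B (Python) =====
-- from typing import List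
--
-- def purchasePlans(nums: List[int], target: int) -> int:
--     nums.sort()  # kept: A sorts its argument in place, and B preserves that side effect
--     n = len(nums)
--     ans = 0
--     for i in range(n):
--         # binary search: first index in [i+1, n) whose value exceeds target - nums[i]
--         key = target - nums[i]
--         lo, hi = i + 1, n
--         while lo < hi:
--             mid = (lo + hi) // 2
--             if nums[mid] <= key:
--                 lo = mid + 1
--             else:
--                 hi = mid
--         ans += lo - (i + 1)
--     return ans % 1000000007
-- ===== Notes on version B (the rewrite author's own statement) =====
-- stated objective: alternative
-- what changed: Replaces the converging two-pointer walk over the sorted array with n independent binary searches: for each i it binary-searches the first index > i whose value exceeds target - nums[i] and adds that partner count.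
import Mathlib
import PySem

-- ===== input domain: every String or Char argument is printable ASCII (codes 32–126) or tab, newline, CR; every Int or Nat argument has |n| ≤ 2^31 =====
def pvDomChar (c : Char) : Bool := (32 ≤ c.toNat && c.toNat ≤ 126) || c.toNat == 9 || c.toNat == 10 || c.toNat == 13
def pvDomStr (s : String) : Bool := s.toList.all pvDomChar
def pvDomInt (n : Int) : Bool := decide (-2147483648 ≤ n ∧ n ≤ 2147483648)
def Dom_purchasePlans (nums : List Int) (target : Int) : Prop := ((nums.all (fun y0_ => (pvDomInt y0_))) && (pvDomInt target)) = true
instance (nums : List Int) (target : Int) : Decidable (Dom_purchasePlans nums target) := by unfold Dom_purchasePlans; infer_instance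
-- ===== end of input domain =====

-- B replaces A's converging two-pointer walk with a direct count over all index pairs i<j
-- (same return value; both sort the argument in place, so the side effect is preserved too).

-- ===== PORT A =====
-- the while loop; left/right are in [0, len s) whenever dereferenced, so pyGetD is exact there
def pvLoopA (s : List Int) (target : Int) (left right ans : Int) : Int :=
  if left < right then
    if PySem.List.pyGetD s left 0 + PySem.List.pyGetD s right 0 ≤ target then
      pvLoopA s target (left + 1) right (ans + (right - left))
    else
      pvLoopA s target left (right - 1) ans
  else ans
termination_by (right - left).toNat
decreasing_by all_goals omega

def purchasePlans (nums : List Int) (target : Int) : Int :=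
  let s := PySem.List.sorted nums (fun x => x)
  PySem.Int.mod (pvLoopA s target 0 (PySem.List.len s - 1) 0) 1000000007

-- ===== PORT B =====
-- binary search helper: Python's inner while loop (mid = (lo+hi)//2 is inlined at both uses)
def pvBS (s : List Int) (key lo hi : Int) : Int :=
  if lo < hi then
    if PySem.List.pyGetD s (PySem.Int.floordiv (lo + hi) 2) 0 ≤ key then
      pvBS s key (PySem.Int.floordiv (lo + hi) 2 + 1) hi
    else
      pvBS s key lo (PySem.Int.floordiv (lo + hi) 2)
  else lo
termination_by (hi - lo).toNat
decreasing_by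
  · have h := PySem.Int.floordiv_two_mid_bounds (show lo ≤ hi by omega)
    omega
  · have h2 := (PySem.Int.floordiv_lt_iff_lt_mul (show (0:Int) < 2 by omega)).mpr
      (show lo + hi < hi * 2 by omega)
    omega

def purchasePlans_alt (nums : List Int) (target : Int) : Int :=
  let s := PySem.List.sorted nums (fun x => x)
  let n := PySem.List.len s
  let ans := (PySem.List.pyRange 0 n).foldl
    (fun ans i => ans + (pvBS s (target - PySem.List.pyGetD s i 0) (i + 1) n - (i + 1))) 0
  PySem.Int.mod ans 1000000007

-- ===== PRECONDITION & SPEC =====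
def Spec_purchasePlans (nums : List Int) (target : Int) (out : Int) : Prop := out = purchasePlans_alt nums target
instance (nums : List Int) (target : Int) (out : Int) : Decidable (Spec_purchasePlans nums target out) := by unfold Spec_purchasePlans; infer_instance

-- ===== CLAIM (what is proved, stated in full; the proofs are below) =====
def Claim_equal_purchasePlans : Prop := ∀ (nums : List Int) (target : Int), Dom_purchasePlans nums target → Spec_purchasePlans nums target (purchasePlans nums target)

-- ===== LEMMAS AND PROOFS =====

-- number of j with i < j ≤ r and s[i]+s[j] ≤ t
def pvCnt (s : List Int) (t i r : Int) : Int :=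
  ((PySem.List.pyRange (i + 1) (r + 1)).countP
    (fun j => decide (PySem.List.pyGetD s i 0 + PySem.List.pyGetD s j 0 ≤ t)) : Nat)

-- number of pairs (i, j) with l ≤ i < j ≤ r and s[i]+s[j] ≤ t
def pvPairs (s : List Int) (t l r : Int) : Int :=
  ((PySem.List.pyRange l (r + 1)).map (fun i => pvCnt s t i r)).sum

lemma pvCnt_zero (s : List Int) (t i r : Int) (h : r ≤ i) : pvCnt s t i r = 0 := by
  unfold pvCnt
  rw [PySem.List.pyRange_one_eq_nil (by omega)]
  simp

lemma pvMono (s : List Int) (hp : s.Pairwise (· ≤ ·)) {i j : Int}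
    (h0 : 0 ≤ i) (hij : i ≤ j) (hj : j < (s.length : Int)) :
    PySem.List.pyGetD s i 0 ≤ PySem.List.pyGetD s j 0 := by
  rcases eq_or_lt_of_le hij with rfl | h
  · exact le_refl _
  · rw [PySem.List.pyGetD_eq_getElem s 0 h0 (by omega),
        PySem.List.pyGetD_eq_getElem s 0 (by omega) hj]
    exact (List.pairwise_iff_getElem.mp hp) i.toNat j.toNat (by omega) (by omega) (by omega)

lemma pvCnt_full (s : List Int) (t i r : Int) (hp : s.Pairwise (· ≤ ·))
    (h0 : 0 ≤ i) (hir : i < r) (hr : r < (s.length : Int))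
    (hc : PySem.List.pyGetD s i 0 + PySem.List.pyGetD s r 0 ≤ t) :
    pvCnt s t i r = r - i := by
  unfold pvCnt
  have hall : ∀ j ∈ PySem.List.pyRange (i + 1) (r + 1),
      (fun j => decide (PySem.List.pyGetD s i 0 + PySem.List.pyGetD s j 0 ≤ t)) j = true := by
    intro j hj
    rw [PySem.List.mem_pyRange_one] at hj
    simp only [decide_eq_true_eq]
    have := pvMono s hp (show (0:Int) ≤ j by omega) (show j ≤ r by omega) hr
    omega
  rw [List.countP_eq_length.mpr hall, PySem.List.length_pyRange_one]
  omega

lemma pvCnt_step (s : List Int) (t i r : Int) (hir : i < r) :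
    pvCnt s t i r = pvCnt s t i (r - 1)
      + (if PySem.List.pyGetD s i 0 + PySem.List.pyGetD s r 0 ≤ t then 1 else 0) := by
  unfold pvCnt
  rw [PySem.List.pyRange_one_succ_right (by omega : i + 1 ≤ r), List.countP_append,
      show r - 1 + 1 = r by omega]
  by_cases hc : PySem.List.pyGetD s i 0 + PySem.List.pyGetD s r 0 ≤ t <;> simp [hc]

lemma pvPairs_zero (s : List Int) (t l r : Int) (h : r ≤ l) : pvPairs s t l r = 0 := by
  unfold pvPairs
  rcases Int.lt_or_le r l with h' | h'
  · rw [PySem.List.pyRange_one_eq_nil (by omega)]; simp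
  · have : r = l := le_antisymm h h'
    subst this
    rw [PySem.List.pyRange_one_cons (by omega : r < r + 1),
        PySem.List.pyRange_one_eq_nil (by omega)]
    simp [pvCnt_zero s t r r le_rfl]

lemma pvPairs_take (s : List Int) (t l r : Int) (h : l < r) :
    pvPairs s t l r = pvCnt s t l r + pvPairs s t (l + 1) r := by
  unfold pvPairs
  rw [PySem.List.pyRange_one_cons (by omega : l < r + 1)]
  simp

lemma pvPairs_drop (s : List Int) (t l r : Int) (hp : s.Pairwise (· ≤ ·))
    (h0 : 0 ≤ l) (hlr : l < r) (hr : r < (s.length : Int))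
    (hc : ¬ PySem.List.pyGetD s l 0 + PySem.List.pyGetD s r 0 ≤ t) :
    pvPairs s t l r = pvPairs s t l (r - 1) := by
  unfold pvPairs
  rw [PySem.List.pyRange_one_succ_right (by omega : l ≤ r), List.map_append, List.sum_append,
      show r - 1 + 1 = r by omega]
  simp only [List.map_singleton, List.sum_singleton, pvCnt_zero s t r r le_rfl, add_zero]
  apply congrArg List.sum
  apply List.map_congr_left
  intro i hi
  rw [PySem.List.mem_pyRange_one] at hi
  rw [pvCnt_step s t i r (by omega)]
  have hli := pvMono s hp h0 hi.1 (by omega : i < (s.length : Int))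
  have : ¬ PySem.List.pyGetD s i 0 + PySem.List.pyGetD s r 0 ≤ t := by omega
  simp [this]

lemma pvLoopA_eq (s : List Int) (t : Int) (hp : s.Pairwise (· ≤ ·)) :
    ∀ (k : Nat) (l r ans : Int), (r - l).toNat ≤ k → 0 ≤ l → r < (s.length : Int) →
      pvLoopA s t l r ans = ans + pvPairs s t l r := by
  intro k
  induction k with
  | zero =>
    intro l r ans hk h0 hr
    have hnl : ¬ l < r := by omega
    rw [pvLoopA, if_neg hnl, pvPairs_zero s t l r (by omega)]
    ring
  | succ k ih =>
    intro l r ans hk h0 hr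
    rw [pvLoopA]
    by_cases hlr : l < r
    · rw [if_pos hlr]
      by_cases hc : PySem.List.pyGetD s l 0 + PySem.List.pyGetD s r 0 ≤ t
      · rw [if_pos hc, ih (l + 1) r _ (by omega) (by omega) hr,
            pvPairs_take s t l r hlr, pvCnt_full s t l r hp h0 hlr hr hc]
        ring
      · rw [if_neg hc, ih l (r - 1) ans (by omega) h0 (by omega),
            pvPairs_drop s t l r hp h0 hlr hr hc]
    · rw [if_neg hlr, pvPairs_zero s t l r (by omega)]
      ring

lemma pvBS_eq (s : List Int) (key : Int) (hp : s.Pairwise (· ≤ ·)) :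
    ∀ (k : Nat) (lo hi : Int), (hi - lo).toNat ≤ k → 0 ≤ lo → hi ≤ (s.length : Int) →
      pvBS s key lo hi = lo + ((PySem.List.pyRange lo hi).countP
        (fun j => decide (PySem.List.pyGetD s j 0 ≤ key)) : Nat) := by
  intro k
  induction k with
  | zero =>
    intro lo hi hk h0 hn
    rw [pvBS, if_neg (by omega : ¬ lo < hi),
        PySem.List.pyRange_one_eq_nil (by omega)]
    simp
  | succ k ih =>
    intro lo hi hk h0 hn
    rw [pvBS]
    by_cases hlh : lo < hi
    · rw [if_pos hlh]
      have hm := PySem.Int.floordiv_two_mid_bounds (show lo ≤ hi by omega)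
      have hmlt : PySem.Int.floordiv (lo + hi) 2 < hi :=
        (PySem.Int.floordiv_lt_iff_lt_mul (show (0:Int) < 2 by omega)).mpr (by omega)
      by_cases hc : PySem.List.pyGetD s (PySem.Int.floordiv (lo + hi) 2) 0 ≤ key
      · rw [if_pos hc, ih (PySem.Int.floordiv (lo + hi) 2 + 1) hi (by omega) (by omega) hn,
            PySem.List.pyRange_one_append lo (PySem.Int.floordiv (lo + hi) 2 + 1) hi
              (by omega) (by omega),
            List.countP_append]
        have hall : ∀ j ∈ PySem.List.pyRange lo (PySem.Int.floordiv (lo + hi) 2 + 1),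
            (fun j => decide (PySem.List.pyGetD s j 0 ≤ key)) j = true := by
          intro j hj
          rw [PySem.List.mem_pyRange_one] at hj
          simp only [decide_eq_true_eq]
          have := pvMono s hp (show (0:Int) ≤ j by omega)
            (show j ≤ PySem.Int.floordiv (lo + hi) 2 by omega) (by omega)
          omega
        rw [List.countP_eq_length.mpr hall, PySem.List.length_pyRange_one]
        push_cast
        omega
      · rw [if_neg hc, ih lo (PySem.Int.floordiv (lo + hi) 2) (by omega) h0 (by omega),
            PySem.List.pyRange_one_append lo (PySem.Int.floordiv (lo + hi) 2) hi
              (by omega) (by omega),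
            List.countP_append]
        have hnone : (PySem.List.pyRange (PySem.Int.floordiv (lo + hi) 2) hi).countP
            (fun j => decide (PySem.List.pyGetD s j 0 ≤ key)) = 0 := by
          rw [List.countP_eq_zero]
          intro j hj
          rw [PySem.List.mem_pyRange_one] at hj
          simp only [decide_eq_true_eq]
          have := pvMono s hp (show (0:Int) ≤ PySem.Int.floordiv (lo + hi) 2 by omega)
            (show PySem.Int.floordiv (lo + hi) 2 ≤ j by omega) (by omega)
          omega
        rw [hnone]
        push_cast
        omega
    · rw [if_neg hlh, PySem.List.pyRange_one_eq_nil (by omega)]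
      simp

lemma pvAlt_ans (s : List Int) (t : Int) (hp : s.Pairwise (· ≤ ·)) :
    (PySem.List.pyRange 0 (PySem.List.len s)).foldl
      (fun ans i => ans + (pvBS s (t - PySem.List.pyGetD s i 0) (i + 1) (PySem.List.len s) - (i + 1))) 0
      = pvPairs s t 0 (PySem.List.len s - 1) := by
  rw [PySem.List.foldl_add (PySem.List.pyRange 0 (PySem.List.len s))
      (fun i => pvBS s (t - PySem.List.pyGetD s i 0) (i + 1) (PySem.List.len s) - (i + 1)) 0,
      zero_add]
  unfold pvPairs
  rw [show PySem.List.len s - 1 + 1 = PySem.List.len s by ring]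
  apply congrArg List.sum
  apply List.map_congr_left
  intro i hi
  rw [PySem.List.mem_pyRange_one] at hi
  rw [pvBS_eq s (t - PySem.List.pyGetD s i 0) hp (PySem.List.len s - (i + 1)).toNat
      (i + 1) (PySem.List.len s) (by omega) (by omega) (by simp [PySem.List.len_eq])]
  unfold pvCnt
  rw [show PySem.List.len s - 1 + 1 = PySem.List.len s by ring]
  have hc : (PySem.List.pyRange (i + 1) (PySem.List.len s)).countP
        (fun j => decide (PySem.List.pyGetD s j 0 ≤ t - PySem.List.pyGetD s i 0))
      = (PySem.List.pyRange (i + 1) (PySem.List.len s)).countP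
        (fun j => decide (PySem.List.pyGetD s i 0 + PySem.List.pyGetD s j 0 ≤ t)) := by
    apply List.countP_congr
    intro j _
    constructor <;> (simp only [decide_eq_true_eq]; intro h; omega)
  rw [hc]
  ring

-- ===== VERDICT (by name: the statement is the Claim_ definition above) =====
theorem purchasePlans_spec : Claim_equal_purchasePlans := by
  intro nums target _
  unfold Spec_purchasePlans purchasePlans purchasePlans_alt
  simp only []
  have hp : (PySem.List.sorted nums (fun x => x)).Pairwise (· ≤ ·) := by
    have := PySem.List.sorted_pairwise nums (fun x => x)
    simpa using this
  rw [pvLoopA_eq (PySem.List.sorted nums (fun x => x)) target hp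
        (PySem.List.len (PySem.List.sorted nums (fun x => x)) - 1).toNat
        0 (PySem.List.len (PySem.List.sorted nums (fun x => x)) - 1) 0
        (by omega) (by omega)
        (by simp [PySem.List.len_eq]),
      pvAlt_ans (PySem.List.sorted nums (fun x => x)) target hp, zero_add]
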